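-- pv_equiv track=rewrite | github.com/leonardomurakami/graduation-ime-usp | MAC0216-Tecnicas de Programacao I/ep3/src/views.py | _get_piece_offset
-- ===== SOURCE A (Python) =====
-- def _get_piece_offset(preview: list[list[str]]) -> tuple[int, int]:
--     """!
--     @brief Calcula o deslocamento necessário para centralizar uma peça na prévia
--
--     @param preview Grade de prévia da peça
--     @return tuple[int, int] Deslocamento (x, y) para centralização
--     """
--     min_row = 4
--     max_row = -1
--     min_col = 4
--     max_col = -1
--
--     for row in range(4):
--         for col in range(4):
--             if preview[row][col] != ' ':
--                 min_row = min(min_row, row)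
--                 max_row = max(max_row, row)
--                 min_col = min(min_col, col)
--                 max_col = max(max_col, col)
--
--     if max_row == -1:
--         return 0, 0
--
--     piece_height = max_row - min_row + 1
--     piece_width = max_col - min_col + 1
--
--     offset_y = (4 - piece_height) // 2
--     offset_x = (4 - piece_width) // 2
--
--     return offset_x - min_col, offset_y - min_row
-- ===== SOURCE B (Python) =====
-- def _get_piece_offset(preview: list[list[str]]) -> tuple[int, int]:
--     """Bitmask version: pack occupancy into 4-bit row/column masks, then read the
--     bounding box off the masks with bit arithmetic (lowest set bit / bit_length)."""
--     col_mask = 0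
--     row_mask = 0
--     for r in range(4):
--         m = 0
--         for c in range(4):
--             if preview[r][c] != ' ':
--                 m |= 1 << c
--         col_mask |= m
--         if m != 0:
--             row_mask |= 1 << r
--     if row_mask == 0:
--         return 0, 0
--     min_row = (row_mask ^ (row_mask & (row_mask - 1))).bit_length() - 1
--     max_row = row_mask.bit_length() - 1
--     min_col = (col_mask ^ (col_mask & (col_mask - 1))).bit_length() - 1
--     max_col = col_mask.bit_length() - 1
--     offset_y = (4 - (max_row - min_row + 1)) // 2
--     offset_x = (4 - (max_col - min_col + 1)) // 2
--     return offset_x - min_col, offset_y - min_row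
-- ===== Notes on version B (the rewrite author's own statement) =====
-- stated objective: alternative
-- what changed: A's fused scan maintaining four running min/max extrema is replaced by packing occupancy into 4-bit row and column bitmasks and reading the bounding box off the masks with bit arithmetic (lowest-set-bit and bit_length).
import Mathlib
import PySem

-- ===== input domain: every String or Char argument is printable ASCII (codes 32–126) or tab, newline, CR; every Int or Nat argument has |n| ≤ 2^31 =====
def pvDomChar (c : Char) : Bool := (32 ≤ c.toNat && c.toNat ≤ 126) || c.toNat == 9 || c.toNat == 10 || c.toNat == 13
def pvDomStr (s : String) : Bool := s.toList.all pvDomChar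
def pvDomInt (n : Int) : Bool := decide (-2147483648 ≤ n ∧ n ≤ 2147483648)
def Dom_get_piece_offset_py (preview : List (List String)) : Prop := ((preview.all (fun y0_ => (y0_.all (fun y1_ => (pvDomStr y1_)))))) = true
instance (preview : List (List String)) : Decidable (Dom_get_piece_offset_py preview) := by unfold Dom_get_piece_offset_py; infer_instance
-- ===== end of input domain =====

-- B replaces A's fused 4x4 scan maintaining four running extrema by packing occupancy
-- into 4-bit row/column bitmasks and reading the bounding box off the masks with bit
-- arithmetic (lowest set bit / bit_length); same cost, different algorithm.


-- cell lookup preview[r][c]; the getD defaults are never reached inside Pre_ (grid is at least 4x4)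
def pvCell (preview : List (List String)) (r c : Int) : String :=
  (PySem.List.pyGet? ((PySem.List.pyGet? preview r).getD []) c).getD " "

-- ===== PORT A =====
-- fused pass over the 4x4 grid maintaining (min_row, max_row, min_col, max_col)
def get_piece_offset_py (preview : List (List String)) : Int × Int :=
  let st := (PySem.List.pyRange 0 4 1).foldl (fun s row =>
    (PySem.List.pyRange 0 4 1).foldl (fun s col =>
      if pvCell preview row col != " " then
        (min s.1 row, max s.2.1 row, min s.2.2.1 col, max s.2.2.2 col)
      else s) s) ((4 : Int), (-1 : Int), (4 : Int), (-1 : Int))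
  if st.2.1 = -1 then (0, 0)
  else
    let piece_height := st.2.1 - st.1 + 1
    let piece_width := st.2.2.2 - st.2.2.1 + 1
    let offset_y := PySem.Int.floordiv (4 - piece_height) 2
    let offset_x := PySem.Int.floordiv (4 - piece_width) 2
    (offset_x - st.2.2.1, offset_y - st.1)

-- ===== PORT B =====
-- exact port of Python int.bit_length for a nonnegative int
def pvBitLength (n : Nat) : Int := if n = 0 then 0 else (Nat.log2 n : Int) + 1

-- bitmask pass: m is the row's 4-bit column mask; col_mask ORs them, row_mask records
-- nonempty rows; then min = index of lowest set bit (m ^ (m & (m-1)) isolates it, all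
-- operands nonnegative, so Nat bitwise ops are exact), max = bit_length - 1.
-- c.toNat/r.toNat on the shift amounts is exact: pyRange 0 4 1 yields 0..3.
def get_piece_offset_py_alt (preview : List (List String)) : Int × Int :=
  let st := (PySem.List.pyRange 0 4 1).foldl (fun (st : Nat × Nat) r =>
    let m := (PySem.List.pyRange 0 4 1).foldl (fun m c =>
      if pvCell preview r c != " " then m ||| (1 <<< c.toNat) else m) 0
    (st.1 ||| m, if m ≠ 0 then st.2 ||| (1 <<< r.toNat) else st.2)) ((0, 0) : Nat × Nat)
  let col_mask := st.1
  let row_mask := st.2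
  if row_mask = 0 then (0, 0)
  else
    let min_row := pvBitLength (row_mask ^^^ (row_mask &&& (row_mask - 1))) - 1
    let max_row := pvBitLength row_mask - 1
    let min_col := pvBitLength (col_mask ^^^ (col_mask &&& (col_mask - 1))) - 1
    let max_col := pvBitLength col_mask - 1
    let offset_y := PySem.Int.floordiv (4 - (max_row - min_row + 1)) 2
    let offset_x := PySem.Int.floordiv (4 - (max_col - min_col + 1)) 2
    (offset_x - min_col, offset_y - min_row)

-- ===== PRECONDITION & SPEC =====
-- Python A indexes preview[row][col] for all row, col in 0..3, so it raises IndexError unless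
-- the grid has at least 4 rows whose first 4 each have at least 4 cells; Pre_ is exactly that.
def Pre_get_piece_offset_py (preview : List (List String)) : Prop :=
  4 ≤ preview.length ∧ ∀ row ∈ preview.take 4, 4 ≤ row.length
instance (preview : List (List String)) : Decidable (Pre_get_piece_offset_py preview) := by
  unfold Pre_get_piece_offset_py; infer_instance

def pvWitness_get_piece_offset_py : List (List String) :=
  [[" ", "X", " ", " "], [" ", "X", " ", " "], [" ", "X", "X", " "], [" ", " ", " ", " "]]

def Spec_get_piece_offset_py (preview : List (List String)) (out : Int × Int) : Prop := out = get_piece_offset_py_alt preview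
instance (preview : List (List String)) (out : Int × Int) : Decidable (Spec_get_piece_offset_py preview out) := by unfold Spec_get_piece_offset_py; infer_instance

-- ===== CLAIM (what is proved, stated in full; the proofs are below) =====
def Claim_equal_get_piece_offset_py : Prop := ∀ (preview : List (List String)), Dom_get_piece_offset_py preview → Pre_get_piece_offset_py preview → Spec_get_piece_offset_py preview (get_piece_offset_py preview)

-- ===== LEMMAS AND PROOFS =====

-- 4-bit mask of four presence booleans
def pvMask (a b c d : Bool) : Nat :=
  (((if a then (1 : Nat) else 0) ||| (if b then 2 else 0)) ||| (if c then 4 else 0)) ||| (if d then 8 else 0)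

-- least / greatest index among four presence bits (4 / -1 = none present)
def pvFirst (a b c d : Bool) : Int :=
  if a then 0 else if b then 1 else if c then 2 else if d then 3 else 4
def pvLast (a b c d : Bool) : Int :=
  if d then 3 else if c then 2 else if b then 1 else if a then 0 else -1

-- one row's contribution to a running minimum / maximum of indices (A's update)
def pvRowMin (a b c d : Bool) (m : Int) : Int :=
  let m := if a then min m 0 else m
  let m := if b then min m 1 else m
  let m := if c then min m 2 else m
  if d then min m 3 else m
def pvRowMax (a b c d : Bool) (m : Int) : Int :=
  let m := if a then max m 0 else m
  let m := if b then max m 1 else m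
  let m := if c then max m 2 else m
  if d then max m 3 else m

theorem pvFirst_le (a b c d : Bool) : pvFirst a b c d ≤ 4 := by
  cases a <;> cases b <;> cases c <;> cases d <;> decide

theorem pvLast_ge (a b c d : Bool) : -1 ≤ pvLast a b c d := by
  cases a <;> cases b <;> cases c <;> cases d <;> decide

theorem pvRowMin_eq (a b c d : Bool) (m : Int) (hm : m ≤ 4) :
    pvRowMin a b c d m = min m (pvFirst a b c d) := by
  cases a <;> cases b <;> cases c <;> cases d <;> simp [pvRowMin, pvFirst] <;> omega

theorem pvRowMax_eq (a b c d : Bool) (m : Int) (hm : -1 ≤ m) :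
    pvRowMax a b c d m = max m (pvLast a b c d) := by
  cases a <;> cases b <;> cases c <;> cases d <;> simp [pvRowMax, pvLast] <;> omega

theorem pvFirst_or (a b c d e f g h : Bool) :
    min (pvFirst a b c d) (pvFirst e f g h) = pvFirst (a || e) (b || f) (c || g) (d || h) := by
  cases a <;> cases b <;> cases c <;> cases d <;> cases e <;> cases f <;> cases g <;> cases h <;> decide

theorem pvLast_or (a b c d e f g h : Bool) :
    max (pvLast a b c d) (pvLast e f g h) = pvLast (a || e) (b || f) (c || g) (d || h) := by
  cases a <;> cases b <;> cases c <;> cases d <;> cases e <;> cases f <;> cases g <;> cases h <;> decide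

theorem pvRowMin_four (a b c d : Bool) : pvRowMin a b c d 4 = pvFirst a b c d := by
  rw [pvRowMin_eq a b c d 4 (by norm_num)]
  exact min_eq_right (pvFirst_le a b c d)

theorem pvRowMax_negone (a b c d : Bool) : pvRowMax a b c d (-1) = pvLast a b c d := by
  rw [pvRowMax_eq a b c d (-1) (by norm_num)]
  exact max_eq_right (pvLast_ge a b c d)

theorem pvRowMin_first (a b c d e f g h : Bool) :
    pvRowMin e f g h (pvFirst a b c d) = pvFirst (a || e) (b || f) (c || g) (d || h) := by
  rw [pvRowMin_eq e f g h _ (pvFirst_le a b c d), pvFirst_or]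

theorem pvRowMax_last (a b c d e f g h : Bool) :
    pvRowMax e f g h (pvLast a b c d) = pvLast (a || e) (b || f) (c || g) (d || h) := by
  rw [pvRowMax_eq e f g h _ (pvLast_ge a b c d), pvLast_or]

-- one inner column loop of A, the four cell tests of the row abstracted as booleans
theorem pvInner_char (t : Int → Int → Bool) (r : Int) (s : Int × Int × Int × Int) :
    List.foldl (fun s col =>
        if t r col then (min s.1 r, max s.2.1 r, min s.2.2.1 col, max s.2.2.2 col) else s)
      s [(0 : Int), 1, 2, 3]
      = (if t r 0 || t r 1 || t r 2 || t r 3 then min s.1 r else s.1,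
         if t r 0 || t r 1 || t r 2 || t r 3 then max s.2.1 r else s.2.1,
         pvRowMin (t r 0) (t r 1) (t r 2) (t r 3) s.2.2.1,
         pvRowMax (t r 0) (t r 1) (t r 2) (t r 3) s.2.2.2) := by
  obtain ⟨s1, s2, s3, s4⟩ := s
  cases h0 : t r 0 <;> cases h1 : t r 1 <;> cases h2 : t r 2 <;> cases h3 : t r 3 <;>
    simp [pvRowMin, pvRowMax, List.foldl, h0, h1, h2, h3]

-- one inner column loop of B builds the row's 4-bit mask
theorem pvInnerB_char (t : Int → Int → Bool) (r : Int) :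
    List.foldl (fun m c => if t r c then m ||| (1 <<< c.toNat) else m) (0 : Nat)
      [(0 : Int), 1, 2, 3]
      = pvMask (t r 0) (t r 1) (t r 2) (t r 3) := by
  cases h0 : t r 0 <;> cases h1 : t r 1 <;> cases h2 : t r 2 <;> cases h3 : t r 3 <;>
    simp [pvMask, List.foldl, h0, h1, h2, h3]

theorem pvMask_or (a b c d e f g h : Bool) :
    pvMask a b c d ||| pvMask e f g h = pvMask (a || e) (b || f) (c || g) (d || h) := by
  cases a <;> cases b <;> cases c <;> cases d <;> cases e <;> cases f <;> cases g <;> cases h <;> decide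

theorem pvMask_ne_zero (a b c d : Bool) : (pvMask a b c d ≠ 0) ↔ (a || b || c || d) = true := by
  cases a <;> cases b <;> cases c <;> cases d <;> decide

-- the two ports agree on every input (the ports themselves are total)
theorem pvMain_eq (preview : List (List String)) :
    get_piece_offset_py preview = get_piece_offset_py_alt preview := by
  have hrange : PySem.List.pyRange 0 4 1 = [(0 : Int), 1, 2, 3] := rfl
  simp only [get_piece_offset_py, get_piece_offset_py_alt, hrange]
  simp only [List.foldl_cons, List.foldl_nil,
    pvInner_char (fun r c => pvCell preview r c != " "),
    pvInnerB_char (fun r c => pvCell preview r c != " ")]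
  simp only [pvRowMin_four, pvRowMin_first, pvRowMax_negone, pvRowMax_last, Nat.zero_or,
    pvMask_or, ne_eq, pvMask_ne_zero, Bool.or_assoc]
  have hac : ((pvCell preview 0 0 != " " || (pvCell preview 0 1 != " " || (pvCell preview 0 2 != " " || pvCell preview 0 3 != " "))) || ((pvCell preview 1 0 != " " || (pvCell preview 1 1 != " " || (pvCell preview 1 2 != " " || pvCell preview 1 3 != " "))) || ((pvCell preview 2 0 != " " || (pvCell preview 2 1 != " " || (pvCell preview 2 2 != " " || pvCell preview 2 3 != " "))) || (pvCell preview 3 0 != " " || (pvCell preview 3 1 != " " || (pvCell preview 3 2 != " " || pvCell preview 3 3 != " ")))))) = ((pvCell preview 0 0 != " " || (pvCell preview 1 0 != " " || (pvCell preview 2 0 != " " || pvCell preview 3 0 != " "))) || ((pvCell preview 0 1 != " " || (pvCell preview 1 1 != " " || (pvCell preview 2 1 != " " || pvCell preview 3 1 != " "))) || ((pvCell preview 0 2 != " " || (pvCell preview 1 2 != " " || (pvCell preview 2 2 != " " || pvCell preview 3 2 != " "))) || (pvCell preview 0 3 != " " || (pvCell preview 1 3 != " " || (pvCell preview 2 3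 != " " || pvCell preview 3 3 != " ")))))) := by
    ac_rfl
  generalize hR0 : (pvCell preview 0 0 != " " || (pvCell preview 0 1 != " " || (pvCell preview 0 2 != " " || pvCell preview 0 3 != " "))) = r0 at hac ⊢
  generalize hR1 : (pvCell preview 1 0 != " " || (pvCell preview 1 1 != " " || (pvCell preview 1 2 != " " || pvCell preview 1 3 != " "))) = r1 at hac ⊢
  generalize hR2 : (pvCell preview 2 0 != " " || (pvCell preview 2 1 != " " || (pvCell preview 2 2 != " " || pvCell preview 2 3 != " "))) = r2 at hac ⊢
  generalize hR3 : (pvCell preview 3 0 != " " || (pvCell preview 3 1 != " " || (pvCell preview 3 2 != " " || pvCell preview 3 3 != " "))) = r3 at hac ⊢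
  generalize hC0 : (pvCell preview 0 0 != " " || (pvCell preview 1 0 != " " || (pvCell preview 2 0 != " " || pvCell preview 3 0 != " "))) = c0 at hac ⊢
  generalize hC1 : (pvCell preview 0 1 != " " || (pvCell preview 1 1 != " " || (pvCell preview 2 1 != " " || pvCell preview 3 1 != " "))) = c1 at hac ⊢
  generalize hC2 : (pvCell preview 0 2 != " " || (pvCell preview 1 2 != " " || (pvCell preview 2 2 != " " || pvCell preview 3 2 != " "))) = c2 at hac ⊢
  generalize hC3 : (pvCell preview 0 3 != " " || (pvCell preview 1 3 != " " || (pvCell preview 2 3 != " " || pvCell preview 3 3 != " "))) = c3 at hac ⊢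
  cases r0 <;> cases r1 <;> cases r2 <;> cases r3 <;> cases c0 <;> cases c1 <;> cases c2 <;> cases c3 <;>
    first | rfl | simp_all

-- ===== VERDICT (by name: the statement is the Claim_ definition above) =====
theorem get_piece_offset_py_spec : Claim_equal_get_piece_offset_py := by
  intro preview _ _
  exact pvMain_eq preview
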